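-- pv_equiv track=rewrite | github.com/Thirace446/Society-Sunlit-Valley-Chinese-Localization | tools/comparison_zh.py | compare_en_us_keys
-- ===== SOURCE A (Python) =====
-- def compare_en_us_keys(dict_v, dict_c):
--     """
--     对比两个已存在的JSON内容。
--     返回：(详细对比报告字典, 是否有差异, 差异键名列表)
--     """
--     all_keys = sorted(set(dict_v.keys()) | set(dict_c.keys()))
--     full_report = {}
--     diff_keys = []
--
--     for key in all_keys:
--         val_v = dict_v.get(key)
--         val_c = dict_c.get(key)
--
--         if key in dict_v and key in dict_c:
--             if val_v == val_c:
--                 status = "完全一致"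
--             else:
--                 status = "值冲突"
--                 diff_keys.append(key)
--         elif key in dict_v:
--             status = "Valley独有键"
--             diff_keys.append(key)
--         else:
--             status = "Cobblemon独有键"
--             diff_keys.append(key)
--
--         full_report[key] = {
--             "status": status,
--             "valley_value": val_v,
--             "cobblemon_value": val_c
--         }
--
--     return full_report, len(diff_keys) > 0, diff_keys
-- ===== SOURCE B (Python) =====
-- def compare_en_us_keys(dict_v, dict_c):
--     """Two-pointer merge of the two independently sorted key lists: each dict's
--     keys are sorted separately, then merged; the branch taken by the merge
--     (equal / left smaller / right smaller) IS the key's category, so no union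
--     set, no membership tests and no per-key re-classification are needed."""
--     kv, kc = sorted(dict_v), sorted(dict_c)
--     i = j = 0
--     report_items = []
--     diff_keys = []
--     while i < len(kv) and j < len(kc):
--         a, b = kv[i], kc[j]
--         if a == b:
--             vv, vc = dict_v[a], dict_c[a]
--             if vv == vc:
--                 status = "完全一致"
--             else:
--                 status = "值冲突"
--                 diff_keys.append(a)
--             report_items.append((a, {"status": status, "valley_value": vv, "cobblemon_value": vc}))
--             i += 1
--             j += 1
--         elif a < b:
--             report_items.append((a, {"status": "Valley独有键", "valley_value": dict_v[a], "cobblemon_value": None}))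
--             diff_keys.append(a)
--             i += 1
--         else:
--             report_items.append((b, {"status": "Cobblemon独有键", "valley_value": None, "cobblemon_value": dict_c[b]}))
--             diff_keys.append(b)
--             j += 1
--     while i < len(kv):
--         a = kv[i]
--         report_items.append((a, {"status": "Valley独有键", "valley_value": dict_v[a], "cobblemon_value": None}))
--         diff_keys.append(a)
--         i += 1
--     while j < len(kc):
--         b = kc[j]
--         report_items.append((b, {"status": "Cobblemon独有键", "valley_value": None, "cobblemon_value": dict_c[b]}))
--         diff_keys.append(b)
--         j += 1
--     return dict(report_items), bool(diff_keys), diff_keys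
-- ===== Notes on version B (the rewrite author's own statement) =====
-- stated objective: alternative
-- what changed: Replaces A's sorted-union-then-classify loop (sort the union of keys, then test membership in both dicts for every key) with a two-pointer merge of the two independently sorted key lists, where the merge branch taken (equal / left head smaller / right head smaller) directly yields each key's category with no union set and no membership tests.
import Mathlib
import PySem

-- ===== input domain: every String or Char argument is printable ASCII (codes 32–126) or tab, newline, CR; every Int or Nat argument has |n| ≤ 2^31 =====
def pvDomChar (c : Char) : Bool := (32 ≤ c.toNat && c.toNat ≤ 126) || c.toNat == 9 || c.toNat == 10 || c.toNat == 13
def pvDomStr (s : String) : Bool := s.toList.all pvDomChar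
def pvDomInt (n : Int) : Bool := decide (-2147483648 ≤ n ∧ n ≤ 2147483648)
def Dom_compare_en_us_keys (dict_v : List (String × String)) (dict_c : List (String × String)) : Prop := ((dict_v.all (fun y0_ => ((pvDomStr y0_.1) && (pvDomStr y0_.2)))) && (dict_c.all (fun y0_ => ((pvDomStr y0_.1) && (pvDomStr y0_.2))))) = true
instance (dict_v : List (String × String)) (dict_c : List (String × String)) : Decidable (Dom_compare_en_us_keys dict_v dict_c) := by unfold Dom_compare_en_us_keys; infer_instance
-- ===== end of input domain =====

-- B replaces A's sorted-union-then-classify loop by a two-pointer merge of the two sorted key lists; return values proved equal, report order included.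

-- ===== PORT A =====
-- The Python arguments are dicts; the association lists are read as Python dicts (Dict.ofList = dict(pairs)).
-- full_report is a dict indexed by the (distinct) keys of all_keys, so its item list is the appends below.
def compare_en_us_keys (dict_v : List (String × String)) (dict_c : List (String × String)) : (List (String × List (String × Option String))) × Bool × List String :=
  let dv := PySem.Dict.ofList dict_v
  let dc := PySem.Dict.ofList dict_c
  let all_keys := PySem.List.sorted (PySem.Set.union (PySem.Set.ofList dv.keys) (PySem.Set.ofList dc.keys)) (fun x => x) false
  let st := all_keys.foldl (fun (acc : (List (String × List (String × Option String))) × List String) key =>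
      let val_v := dv.get? key
      let val_c := dc.get? key
      let sd : String × List String :=
        if dv.contains key && dc.contains key then
          if val_v == val_c then ("完全一致", acc.2)
          else ("值冲突", acc.2 ++ [key])
        else if dv.contains key then ("Valley独有键", acc.2 ++ [key])
        else ("Cobblemon独有键", acc.2 ++ [key])
      (acc.1 ++ [(key, [("status", some sd.1), ("valley_value", val_v), ("cobblemon_value", val_c)])], sd.2))
    ([], [])
  (st.1, decide (0 < st.2.length), st.2)

-- ===== PORT B =====
-- Source B's while loop with two indices i, j over the sorted key lists becomes the obvious two-list recursion;
-- dict_v[a] / dict_c[b] (key known present on the branch taken) are ported as dv.get? a / dc.get? b.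
def pvMergeB (dv dc : PySem.Dict String String) : List String → List String →
    (List (String × List (String × Option String))) × List String
  | [], [] => ([], [])
  | [], b :: kc =>
      let r := pvMergeB dv dc [] kc
      ((b, [("status", some "Cobblemon独有键"), ("valley_value", none), ("cobblemon_value", dc.get? b)]) :: r.1, b :: r.2)
  | a :: kv, [] =>
      let r := pvMergeB dv dc kv []
      ((a, [("status", some "Valley独有键"), ("valley_value", dv.get? a), ("cobblemon_value", none)]) :: r.1, a :: r.2)
  | a :: kv, b :: kc =>
      if a == b then
        let vv := dv.get? a
        let vc := dc.get? a
        let r := pvMergeB dv dc kv kc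
        if vv == vc then
          ((a, [("status", some "完全一致"), ("valley_value", vv), ("cobblemon_value", vc)]) :: r.1, r.2)
        else
          ((a, [("status", some "值冲突"), ("valley_value", vv), ("cobblemon_value", vc)]) :: r.1, a :: r.2)
      else if a < b then
        let r := pvMergeB dv dc kv (b :: kc)
        ((a, [("status", some "Valley独有键"), ("valley_value", dv.get? a), ("cobblemon_value", none)]) :: r.1, a :: r.2)
      else
        let r := pvMergeB dv dc (a :: kv) kc
        ((b, [("status", some "Cobblemon独有键"), ("valley_value", none), ("cobblemon_value", dc.get? b)]) :: r.1, b :: r.2)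
  termination_by kv kc => kv.length + kc.length

-- dict(report_items) over the distinct merged keys; bool(diff_keys) = !isEmpty
def compare_en_us_keys_alt (dict_v : List (String × String)) (dict_c : List (String × String)) : (List (String × List (String × Option String))) × Bool × List String :=
  let dv := PySem.Dict.ofList dict_v
  let dc := PySem.Dict.ofList dict_c
  let kv := PySem.List.sorted dv.keys (fun x => x) false
  let kc := PySem.List.sorted dc.keys (fun x => x) false
  let r := pvMergeB dv dc kv kc
  ((PySem.Dict.ofList r.1).items, !r.2.isEmpty, r.2)

-- ===== PRECONDITION & SPEC =====
def Spec_compare_en_us_keys (dict_v : List (String × String)) (dict_c : List (String × String)) (out : (List (String × List (String × Option String))) × Bool × List String) : Prop := out = compare_en_us_keys_alt dict_v dict_c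
instance (dict_v : List (String × String)) (dict_c : List (String × String)) (out : (List (String × List (String × Option String))) × Bool × List String) : Decidable (Spec_compare_en_us_keys dict_v dict_c out) := by unfold Spec_compare_en_us_keys; infer_instance

-- ===== CLAIM =====
def Claim_equal_compare_en_us_keys : Prop := ∀ (dict_v : List (String × String)) (dict_c : List (String × String)), Dom_compare_en_us_keys dict_v dict_c → Spec_compare_en_us_keys dict_v dict_c (compare_en_us_keys dict_v dict_c)

-- ===== LEMMAS AND PROOFS =====

-- A's status for a key, extracted as a function
def pvStatusA (dv dc : PySem.Dict String String) (k : String) : String :=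
  if dv.contains k && dc.contains k then
    (if dv.get? k == dc.get? k then "完全一致" else "值冲突")
  else if dv.contains k then "Valley独有键" else "Cobblemon独有键"

-- A's per-key report entry
def pvEntryA (dv dc : PySem.Dict String String) (k : String) : String × List (String × Option String) :=
  (k, [("status", some (pvStatusA dv dc k)), ("valley_value", dv.get? k), ("cobblemon_value", dc.get? k)])

-- the "this key is a difference" predicate of A's loop
def pvDiffP (dv dc : PySem.Dict String String) (k : String) : Bool :=
  !(dv.contains k && dc.contains k && (dv.get? k == dc.get? k))

theorem pvFoldA (dv dc : PySem.Dict String String) (ks : List String)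
    (r : List (String × List (String × Option String))) (d : List String) :
    (ks.foldl (fun (acc : (List (String × List (String × Option String))) × List String) key =>
      let val_v := dv.get? key
      let val_c := dc.get? key
      let sd : String × List String :=
        if dv.contains key && dc.contains key then
          if val_v == val_c then ("完全一致", acc.2)
          else ("值冲突", acc.2 ++ [key])
        else if dv.contains key then ("Valley独有键", acc.2 ++ [key])
        else ("Cobblemon独有键", acc.2 ++ [key])
      (acc.1 ++ [(key, [("status", some sd.1), ("valley_value", val_v), ("cobblemon_value", val_c)])], sd.2))
      (r, d))
    = (r ++ ks.map (pvEntryA dv dc), d ++ ks.filter (pvDiffP dv dc)) := by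
  induction ks generalizing r d with
  | nil => simp
  | cons k ks ih =>
    simp only [List.foldl_cons, List.map_cons, List.filter_cons, ih]
    by_cases h1 : dv.contains k <;> by_cases h2 : dc.contains k <;>
      by_cases h3 : dv.get? k == dc.get? k <;>
      simp [pvStatusA, pvDiffP, pvEntryA, h1, h2, h3]

-- the key list that B's merge walks through
def pvMergeK : List String → List String → List String
  | [], kc => kc
  | a :: kv, [] => a :: pvMergeK kv []
  | a :: kv, b :: kc =>
      if a == b then a :: pvMergeK kv kc
      else if a < b then a :: pvMergeK kv (b :: kc)
      else b :: pvMergeK (a :: kv) kc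
  termination_by kv kc => kv.length + kc.length

theorem pvMemMergeK (kv kc : List String) (k : String) :
    k ∈ pvMergeK kv kc ↔ k ∈ kv ∨ k ∈ kc := by
  fun_induction pvMergeK kv kc with
  | case1 kc => simp
  | case2 a kv ih => simp_all
  | case3 a kv b kc h ih =>
      have hab : a = b := by simpa using h
      subst hab
      simp only [List.mem_cons, ih]; tauto
  | case4 a kv b kc h h2 ih => simp only [List.mem_cons, ih]; tauto
  | case5 a kv b kc h h2 ih => simp only [List.mem_cons, ih]; tauto

theorem pvPairwiseMergeK (kv kc : List String) :
    kv.Pairwise (· < ·) → kc.Pairwise (· < ·) → (pvMergeK kv kc).Pairwise (· < ·) := by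
  fun_induction pvMergeK kv kc with
  | case1 kc => exact fun _ h => h
  | case2 a kv ih =>
      intro hv hc
      rw [List.pairwise_cons] at hv
      refine (List.pairwise_cons).mpr ⟨?_, ih hv.2 hc⟩
      intro k hk
      rcases (pvMemMergeK _ _ _).mp hk with h | h
      · exact hv.1 k h
      · simp at h
  | case3 a kv b kc h ih =>
      intro hv hc
      have hab : a = b := by simpa using h
      subst hab
      rw [List.pairwise_cons] at hv hc
      refine (List.pairwise_cons).mpr ⟨?_, ih hv.2 hc.2⟩
      intro k hk
      rcases (pvMemMergeK _ _ _).mp hk with hm | hm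
      · exact hv.1 k hm
      · exact hc.1 k hm
  | case4 a kv b kc h h2 ih =>
      intro hv hc
      have hab : a < b := by simpa using h2
      rw [List.pairwise_cons] at hv
      refine (List.pairwise_cons).mpr ⟨?_, ih hv.2 hc⟩
      intro k hk
      rcases (pvMemMergeK _ _ _).mp hk with hm | hm
      · exact hv.1 k hm
      · rcases List.mem_cons.mp hm with rfl | hm
        · exact hab
        · exact lt_trans hab ((List.pairwise_cons.mp hc).1 k hm)
  | case5 a kv b kc h h2 ih =>
      intro hv hc
      have hne : ¬ a = b := by simpa using h
      have hba : b < a := lt_of_le_of_ne (not_lt.mp (by simpa using h2)) (Ne.symm hne)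
      rw [List.pairwise_cons] at hc
      refine (List.pairwise_cons).mpr ⟨?_, ih hv hc.2⟩
      intro k hk
      rcases (pvMemMergeK _ _ _).mp hk with hm | hm
      · rcases List.mem_cons.mp hm with rfl | hm
        · exact hba
        · exact lt_trans hba ((List.pairwise_cons.mp hv).1 k hm)
      · exact hc.1 k hm

-- B's merge entry / diff predicate, parametrised by the current key lists
def pvEntryM (dv dc : PySem.Dict String String) (kv kc : List String) (k : String) : String × List (String × Option String) :=
  if k ∈ kv then
    if k ∈ kc then
      (k, [("status", some (if dv.get? k == dc.get? k then "完全一致" else "值冲突")), ("valley_value", dv.get? k), ("cobblemon_value", dc.get? k)])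
    else
      (k, [("status", some "Valley独有键"), ("valley_value", dv.get? k), ("cobblemon_value", none)])
  else (k, [("status", some "Cobblemon独有键"), ("valley_value", none), ("cobblemon_value", dc.get? k)])

def pvPM (dv dc : PySem.Dict String String) (kv kc : List String) (k : String) : Bool :=
  !(decide (k ∈ kv) && decide (k ∈ kc) && (dv.get? k == dc.get? k))

theorem pvMergeSpec (dv dc : PySem.Dict String String) (kv kc : List String) :
    kv.Pairwise (· < ·) → kc.Pairwise (· < ·) →
    pvMergeB dv dc kv kc
      = ((pvMergeK kv kc).map (pvEntryM dv dc kv kc), (pvMergeK kv kc).filter (pvPM dv dc kv kc)) := by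
  fun_induction pvMergeB dv dc kv kc with
  | case1 => intro _ _; simp [pvMergeK]
  | case2 b kc r ih =>
      intro _ hc
      rw [List.pairwise_cons] at hc
      show (_ :: r.1, b :: r.2) = _
      have hr : r = _ := ih List.Pairwise.nil hc.2
      rw [hr]
      show (_, _) = ((pvMergeK [] (b :: kc)).map _, (pvMergeK [] (b :: kc)).filter _)
      simp only [pvMergeK, List.map_cons, List.filter_cons]
      have h1 : pvEntryM dv dc [] (b :: kc) b = (b, [("status", some "Cobblemon独有键"), ("valley_value", none), ("cobblemon_value", dc.get? b)]) := by
        simp [pvEntryM]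
      have h2 : pvPM dv dc [] (b :: kc) b = true := by simp [pvPM]
      rw [h1, h2]
      refine congrArg₂ _ (congrArg _ (List.map_congr_left ?_)) (congrArg _ ?_)
      · intro k hk; simp [pvEntryM]
      · refine List.filter_congr ?_
        intro k hk; simp [pvPM]
  | case3 a kv r ih =>
      intro hv _
      rw [List.pairwise_cons] at hv
      have hmem : ∀ k ∈ pvMergeK kv [], k ∈ kv := by
        intro k hk; rcases (pvMemMergeK _ _ _).mp hk with h | h
        · exact h
        · simp at h
      have hne : ∀ k ∈ pvMergeK kv [], ¬ k = a := by
        intro k hk h; subst h; exact absurd (hv.1 k (hmem k hk)) (lt_irrefl k)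
      show (_ :: r.1, a :: r.2) = _
      have hr : r = _ := ih hv.2 List.Pairwise.nil
      rw [hr]
      show (_, _) = ((pvMergeK (a :: kv) []).map _, (pvMergeK (a :: kv) []).filter _)
      simp only [pvMergeK, List.map_cons, List.filter_cons]
      have h1 : pvEntryM dv dc (a :: kv) [] a = (a, [("status", some "Valley独有键"), ("valley_value", dv.get? a), ("cobblemon_value", none)]) := by
        simp [pvEntryM]
      have h2 : pvPM dv dc (a :: kv) [] a = true := by simp [pvPM]
      rw [h1, h2]
      refine congrArg₂ _ (congrArg _ (List.map_congr_left ?_)) (congrArg _ ?_)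
      · intro k hk; simp [pvEntryM, hmem k hk, hne k hk]
      · refine List.filter_congr ?_
        intro k hk; simp [pvPM, hmem k hk]
  | case4 a kv b kc heq vv vc r hvc ih =>
      intro hv hc
      have hab : a = b := by simpa using heq
      subst hab
      rw [List.pairwise_cons] at hv hc
      have hgt : ∀ k ∈ pvMergeK kv kc, a < k := by
        intro k hk; rcases (pvMemMergeK _ _ _).mp hk with h | h
        · exact hv.1 k h
        · exact hc.1 k h
      have hne : ∀ k ∈ pvMergeK kv kc, ¬ k = a := by
        intro k hk h; subst h; exact absurd (hgt k hk) (lt_irrefl k)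
      show (_ :: r.1, r.2) = _
      have hr : r = _ := ih hv.2 hc.2
      rw [hr]
      show (_, _) = ((pvMergeK (a :: kv) (a :: kc)).map _, (pvMergeK (a :: kv) (a :: kc)).filter _)
      simp only [pvMergeK, BEq.rfl, if_true, List.map_cons, List.filter_cons]
      have h1 : pvEntryM dv dc (a :: kv) (a :: kc) a = (a, [("status", some "完全一致"), ("valley_value", vv), ("cobblemon_value", vc)]) := by
        simp [pvEntryM, vv, vc, hvc]
      have h2 : pvPM dv dc (a :: kv) (a :: kc) a = false := by
        simp only [pvPM, vv, vc] at hvc ⊢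
        simp [hvc]
      rw [h1, h2]
      simp only [Bool.false_eq_true, if_false]
      refine congrArg₂ _ (congrArg _ (List.map_congr_left ?_)) (List.filter_congr ?_)
      · intro k hk; simp [pvEntryM, hne k hk]
      · intro k hk; simp [pvPM, hne k hk]
  | case5 a kv b kc heq vv vc r hvc ih =>
      intro hv hc
      have hab : a = b := by simpa using heq
      subst hab
      rw [List.pairwise_cons] at hv hc
      have hgt : ∀ k ∈ pvMergeK kv kc, a < k := by
        intro k hk; rcases (pvMemMergeK _ _ _).mp hk with h | h
        · exact hv.1 k h
        · exact hc.1 k h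
      have hne : ∀ k ∈ pvMergeK kv kc, ¬ k = a := by
        intro k hk h; subst h; exact absurd (hgt k hk) (lt_irrefl k)
      show (_ :: r.1, a :: r.2) = _
      have hr : r = _ := ih hv.2 hc.2
      rw [hr]
      show (_, _) = ((pvMergeK (a :: kv) (a :: kc)).map _, (pvMergeK (a :: kv) (a :: kc)).filter _)
      simp only [pvMergeK, BEq.rfl, if_true, List.map_cons, List.filter_cons]
      have h1 : pvEntryM dv dc (a :: kv) (a :: kc) a = (a, [("status", some "值冲突"), ("valley_value", vv), ("cobblemon_value", vc)]) := by
        have : (dv.get? a == dc.get? a) = false := by simpa [vv, vc] using hvc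
        simp [pvEntryM, vv, vc, this]
      have h2 : pvPM dv dc (a :: kv) (a :: kc) a = true := by
        have : (dv.get? a == dc.get? a) = false := by simpa [vv, vc] using hvc
        simp [pvPM, this]
      rw [h1, h2]
      simp only [if_true]
      refine congrArg₂ _ (congrArg _ (List.map_congr_left ?_)) (congrArg _ (List.filter_congr ?_))
      · intro k hk; simp [pvEntryM, hne k hk]
      · intro k hk; simp [pvPM, hne k hk]
  | case6 a kv b kc heq hlt r ih =>
      intro hv hc
      have hab : a < b := by simpa using hlt
      rw [List.pairwise_cons] at hv
      have hgt : ∀ k ∈ pvMergeK kv (b :: kc), a < k := by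
        intro k hk; rcases (pvMemMergeK _ _ _).mp hk with h | h
        · exact hv.1 k h
        · rcases List.mem_cons.mp h with rfl | h
          · exact hab
          · exact lt_trans hab ((List.pairwise_cons.mp hc).1 k h)
      have hne : ∀ k ∈ pvMergeK kv (b :: kc), ¬ k = a := by
        intro k hk h; subst h; exact absurd (hgt k hk) (lt_irrefl k)
      have hanb : a ∉ b :: kc := by
        intro h
        rcases List.mem_cons.mp h with rfl | h
        · exact absurd hab (lt_irrefl a)
        · exact absurd (lt_trans hab ((List.pairwise_cons.mp hc).1 a h)) (lt_irrefl a)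
      show (_ :: r.1, a :: r.2) = _
      have hr : r = _ := ih hv.2 hc
      rw [hr]
      show (_, _) = ((pvMergeK (a :: kv) (b :: kc)).map _, (pvMergeK (a :: kv) (b :: kc)).filter _)
      simp only [pvMergeK, heq, hlt, if_pos, Bool.false_eq_true, if_false, List.map_cons, List.filter_cons]
      have h1 : pvEntryM dv dc (a :: kv) (b :: kc) a = (a, [("status", some "Valley独有键"), ("valley_value", dv.get? a), ("cobblemon_value", none)]) := by
        simp [pvEntryM, hanb]
      have h2 : pvPM dv dc (a :: kv) (b :: kc) a = true := by
        simp [pvPM, hanb]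
      rw [h1, h2]
      simp only [if_true]
      refine congrArg₂ _ (congrArg _ (List.map_congr_left ?_)) (congrArg _ (List.filter_congr ?_))
      · intro k hk; simp [pvEntryM, hne k hk]
      · intro k hk; simp [pvPM, hne k hk]
  | case7 a kv b kc heq hnlt r ih =>
      intro hv hc
      have hne' : ¬ a = b := by simpa using heq
      have hba : b < a := lt_of_le_of_ne (not_lt.mp (by simpa using hnlt)) (Ne.symm hne')
      rw [List.pairwise_cons] at hc
      have hgt : ∀ k ∈ pvMergeK (a :: kv) kc, b < k := by
        intro k hk; rcases (pvMemMergeK _ _ _).mp hk with h | h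
        · rcases List.mem_cons.mp h with rfl | h
          · exact hba
          · exact lt_trans hba ((List.pairwise_cons.mp hv).1 k h)
        · exact hc.1 k h
      have hneb : ∀ k ∈ pvMergeK (a :: kv) kc, ¬ k = b := by
        intro k hk h; subst h; exact absurd (hgt k hk) (lt_irrefl k)
      have hbnv : b ∉ a :: kv := by
        intro h
        rcases List.mem_cons.mp h with rfl | h
        · exact absurd hba (lt_irrefl b)
        · exact absurd (lt_trans hba ((List.pairwise_cons.mp hv).1 b h)) (lt_irrefl b)
      show (_ :: r.1, b :: r.2) = _
      have hr : r = _ := ih hv hc.2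
      rw [hr]
      show (_, _) = ((pvMergeK (a :: kv) (b :: kc)).map _, (pvMergeK (a :: kv) (b :: kc)).filter _)
      simp only [pvMergeK, heq, hnlt, Bool.false_eq_true, if_false, List.map_cons, List.filter_cons]
      have h1 : pvEntryM dv dc (a :: kv) (b :: kc) b = (b, [("status", some "Cobblemon独有键"), ("valley_value", none), ("cobblemon_value", dc.get? b)]) := by
        simp [pvEntryM, hbnv]
      have h2 : pvPM dv dc (a :: kv) (b :: kc) b = true := by
        simp [pvPM, hbnv]
      rw [h1, h2]
      simp only [if_true]
      refine congrArg₂ _ (congrArg _ (List.map_congr_left ?_)) (congrArg _ (List.filter_congr ?_))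
      · intro k hk; simp [pvEntryM, hneb k hk]
      · intro k hk; simp [pvPM, hneb k hk]

-- sorted of a Nodup list is strictly increasing
theorem pvSortedPairwiseLt (xs : List String) (h : xs.Nodup) :
    (PySem.List.sorted xs (fun x => x) false).Pairwise (· < ·) := by
  have hle := PySem.List.sorted_pairwise xs (fun x => x) (κ := String)
  have hnd : (PySem.List.sorted xs (fun x => x) false).Nodup :=
    (PySem.List.sorted_perm _ _ _).nodup_iff.mpr h
  exact (hle.and hnd).imp (fun h => lt_of_le_of_ne h.1 h.2)

-- B's merged key list IS A's sorted key union
theorem pvMergedKeysEq (dv dc : PySem.Dict String String)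
    (hv : dv.keys.Nodup) (hc : dc.keys.Nodup) :
    pvMergeK (PySem.List.sorted dv.keys (fun x => x) false) (PySem.List.sorted dc.keys (fun x => x) false)
      = PySem.List.sorted (PySem.Set.union (PySem.Set.ofList dv.keys) (PySem.Set.ofList dc.keys)) (fun x => x) false := by
  symm
  apply PySem.List.sorted_eq_of_perm_of_pairwise_lt
  · have hpw := pvPairwiseMergeK _ _ (pvSortedPairwiseLt _ hv) (pvSortedPairwiseLt _ hc)
    apply (List.perm_ext_iff_of_nodup hpw.nodup (PySem.Set.nodup_union _ _ (PySem.Set.nodup_ofList _))).mpr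
    intro k
    rw [pvMemMergeK, PySem.List.mem_sorted, PySem.List.mem_sorted,
        PySem.Set.mem_union, PySem.Set.mem_ofList, PySem.Set.mem_ofList]
  · exact pvPairwiseMergeK _ _ (pvSortedPairwiseLt _ hv) (pvSortedPairwiseLt _ hc)

-- B's per-key entry / diff predicate over the full sorted key lists agree with A's
theorem pvEntryEq (dv dc : PySem.Dict String String) (k : String) :
    pvEntryM dv dc (PySem.List.sorted dv.keys (fun x => x) false) (PySem.List.sorted dc.keys (fun x => x) false) k
      = pvEntryA dv dc k := by
  unfold pvEntryM pvEntryA pvStatusA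
  by_cases h1 : k ∈ dv.keys <;> by_cases h2 : k ∈ dc.keys <;>
    simp [PySem.List.mem_sorted, PySem.Dict.contains_eq_decide_mem_keys, h1, h2] <;>
    first
      | exact ((PySem.Dict.get?_eq_none_iff_not_mem_keys _ _).mpr h2).symm
      | exact ((PySem.Dict.get?_eq_none_iff_not_mem_keys _ _).mpr h1).symm

theorem pvPMEq (dv dc : PySem.Dict String String) (k : String) :
    pvPM dv dc (PySem.List.sorted dv.keys (fun x => x) false) (PySem.List.sorted dc.keys (fun x => x) false) k
      = pvDiffP dv dc k := by
  unfold pvPM pvDiffP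
  by_cases h1 : k ∈ dv.keys <;> by_cases h2 : k ∈ dc.keys <;>
    simp [PySem.List.mem_sorted, PySem.Dict.contains_eq_decide_mem_keys, h1, h2]

-- a dict built from distinct keys lists exactly those pairs
theorem pvItemsOfListNodup {ν : Type} (l : List (String × ν)) (h : (l.map Prod.fst).Nodup) :
    (PySem.Dict.ofList l).items = l := by
  have := PySem.Dict.items_foldl_insert_fresh (l := l) (k := Prod.fst) (v := Prod.snd)
    (d := PySem.Dict.empty) (by simp) h
  simpa using this

theorem pvLenPos (l : List String) : decide (0 < l.length) = !l.isEmpty := by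
  cases l <;> simp

-- ===== VERDICT =====
theorem compare_en_us_keys_spec : Claim_equal_compare_en_us_keys := by
  intro dict_v dict_c _
  show _ = _
  unfold compare_en_us_keys compare_en_us_keys_alt
  simp only [pvFoldA, List.nil_append, pvLenPos]
  rw [pvMergeSpec _ _ _ _
        (pvSortedPairwiseLt _ (PySem.Dict.nodup_keys_ofList _))
        (pvSortedPairwiseLt _ (PySem.Dict.nodup_keys_ofList _)),
      pvMergedKeysEq _ _ (PySem.Dict.nodup_keys_ofList _) (PySem.Dict.nodup_keys_ofList _)]
  have hmap : ∀ (ks : List String),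
      ks.map (pvEntryM (PySem.Dict.ofList dict_v) (PySem.Dict.ofList dict_c)
        (PySem.List.sorted (PySem.Dict.ofList dict_v).keys (fun x => x) false)
        (PySem.List.sorted (PySem.Dict.ofList dict_c).keys (fun x => x) false))
      = ks.map (pvEntryA (PySem.Dict.ofList dict_v) (PySem.Dict.ofList dict_c)) := by
    intro ks; exact List.map_congr_left (fun k _ => pvEntryEq _ _ k)
  have hfil : ∀ (ks : List String),
      ks.filter (pvPM (PySem.Dict.ofList dict_v) (PySem.Dict.ofList dict_c)
        (PySem.List.sorted (PySem.Dict.ofList dict_v).keys (fun x => x) false)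
        (PySem.List.sorted (PySem.Dict.ofList dict_c).keys (fun x => x) false))
      = ks.filter (pvDiffP (PySem.Dict.ofList dict_v) (PySem.Dict.ofList dict_c)) := by
    intro ks; exact List.filter_congr (fun k _ => pvPMEq _ _ k)
  rw [hmap, hfil]
  have hnodup : ((PySem.List.sorted (PySem.Set.union (PySem.Set.ofList (PySem.Dict.ofList dict_v).keys) (PySem.Set.ofList (PySem.Dict.ofList dict_c).keys)) (fun x => x) false).map
      (pvEntryA (PySem.Dict.ofList dict_v) (PySem.Dict.ofList dict_c))).map Prod.fst
      = PySem.List.sorted (PySem.Set.union (PySem.Set.ofList (PySem.Dict.ofList dict_v).keys) (PySem.Set.ofList (PySem.Dict.ofList dict_c).keys)) (fun x => x) false := by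
    rw [List.map_map]
    exact List.map_id _
  rw [pvItemsOfListNodup _ (by
    rw [hnodup]
    exact (PySem.List.sorted_perm _ _ _).nodup_iff.mpr
      (PySem.Set.nodup_union _ _ (PySem.Set.nodup_ofList _)))]
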